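-- pv_equiv track=rewrite | github.com/FlorenciaCorrea/lexer | lexer.py | a_mostrar
-- ===== SOURCE A (Python) =====
-- def a_mostrar (word):#
-- 	s = 0
-- 	for c in word:
-- 		if s == 0 and c == 'm':
-- 			s = 1
-- 		elif s == 1 and c == 'o':
-- 			s = 2
-- 		elif s == 2 and c == 's':
-- 			s = 3
-- 		elif s == 3 and c == 't':
-- 			s = 4
-- 		elif s == 4 and c == 'a':
-- 			s = 5
-- 		elif s == 5 and c == 'r':
-- 			s = 6
-- 		else:
-- 			s = -1
-- 			break
-- 	return s == 6
-- ===== SOURCE B (Python) =====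
-- def a_mostrar(word):
--     # Direct comparison against the intended keyword, iterating the input once.
--     return list(word) == list("mostrar")
-- ===== Notes on version B (the rewrite author's own statement) =====
-- stated objective: simpler
-- what changed: Replaces the hand-written per-character state machine with a direct comparison of the materialized character sequence against the literal 'mostrar'.
-- intended difference: On exactly the two inputs 'mostar' and 'mostrar': A's state machine skips the second 'r' state so it returns True on 'mostar' and False on 'mostrar', while B returns True only on 'mostrar', which is the intended keyword the function is named after. — e.g. on a_mostrar("mostar"): A returns true, B returns false
import Mathlib
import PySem

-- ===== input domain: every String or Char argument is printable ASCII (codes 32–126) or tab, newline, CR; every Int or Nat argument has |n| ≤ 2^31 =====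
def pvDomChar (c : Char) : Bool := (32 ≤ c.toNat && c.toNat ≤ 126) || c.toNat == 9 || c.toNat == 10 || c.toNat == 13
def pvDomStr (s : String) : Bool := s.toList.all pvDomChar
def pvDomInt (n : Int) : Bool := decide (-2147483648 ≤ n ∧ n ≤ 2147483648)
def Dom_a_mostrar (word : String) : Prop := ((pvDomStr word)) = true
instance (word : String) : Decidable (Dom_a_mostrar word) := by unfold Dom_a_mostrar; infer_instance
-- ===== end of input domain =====

-- B replaces A's per-character state machine with a direct comparison to the
-- literal "mostrar" (the state machine skips a state, so A accepts "mostar" instead;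
-- that intended difference is stated in D_a_mostrar below).

-- ===== PORT A =====
-- literal transliteration of A's loop: state s, break (return -1) on any mismatch
def aMostrarLoop : List Char → Int → Int
  | [], s => s
  | c :: cs, s =>
    if s == 0 && c == 'm' then aMostrarLoop cs 1
    else if s == 1 && c == 'o' then aMostrarLoop cs 2
    else if s == 2 && c == 's' then aMostrarLoop cs 3
    else if s == 3 && c == 't' then aMostrarLoop cs 4
    else if s == 4 && c == 'a' then aMostrarLoop cs 5
    else if s == 5 && c == 'r' then aMostrarLoop cs 6
    else (-1)  -- break

def a_mostrar (word : String) : Bool :=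
  aMostrarLoop word.toList 0 == 6

-- ===== PORT B =====
def a_mostrar_alt (word : String) : Bool :=
  word.toList == "mostrar".toList

-- ===== PRECONDITION & SPEC =====
-- On exactly 'mostar' and 'mostrar': A's state machine skips the second 'r' state, so A
-- returns True on 'mostar' and False on 'mostrar'; B returns True only on 'mostrar',
-- the intended keyword the function is named after.
def D_a_mostrar (word : String) : Prop := word = "mostar" ∨ word = "mostrar"
instance (word : String) : Decidable (D_a_mostrar word) := by unfold D_a_mostrar; infer_instance

def Spec_a_mostrar (word : String) (out : Bool) : Prop := ¬ D_a_mostrar word → out = a_mostrar_alt word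
instance (word : String) (out : Bool) : Decidable (Spec_a_mostrar word out) := by unfold Spec_a_mostrar; infer_instance

def pvDiffWitness_a_mostrar : String := "mostar"
def pvDiffWitnessOut_a_mostrar : Bool × Bool := (true, false)

-- ===== CLAIM (what is proved, stated in full; the proofs are below) =====
def Claim_unchanged_a_mostrar : Prop := ∀ (word : String), Dom_a_mostrar word → Spec_a_mostrar word (a_mostrar word)
def Claim_changed_a_mostrar : Prop := Dom_a_mostrar (pvDiffWitness_a_mostrar) ∧ D_a_mostrar (pvDiffWitness_a_mostrar) ∧ a_mostrar (pvDiffWitness_a_mostrar) = pvDiffWitnessOut_a_mostrar.1 ∧ a_mostrar_alt (pvDiffWitness_a_mostrar) = pvDiffWitnessOut_a_mostrar.2 ∧ pvDiffWitnessOut_a_mostrar.1 ≠ pvDiffWitnessOut_a_mostrar.2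
def Claim_exact_a_mostrar : Prop := ∀ (word : String), Dom_a_mostrar word → D_a_mostrar word → a_mostrar word ≠ a_mostrar_alt word

-- ===== LEMMAS AND PROOFS =====

-- At each state k, reaching 6 requires exactly the remaining suffix of "mostar".
theorem aLoop6 (l : List Char) : aMostrarLoop l 6 = 6 ↔ l = [] := by
  cases l with
  | nil => simp [aMostrarLoop]
  | cons c cs => simp [aMostrarLoop]

theorem aLoop5 (l : List Char) : aMostrarLoop l 5 = 6 ↔ l = ['r'] := by
  cases l with
  | nil => simp [aMostrarLoop]
  | cons c cs =>
    by_cases h : c = 'r'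
    · subst h; simp [aMostrarLoop, aLoop6]
    · simp [aMostrarLoop, h]

theorem aLoop4 (l : List Char) : aMostrarLoop l 4 = 6 ↔ l = ['a','r'] := by
  cases l with
  | nil => simp [aMostrarLoop]
  | cons c cs =>
    by_cases h : c = 'a'
    · subst h; simp [aMostrarLoop, aLoop5]
    · simp [aMostrarLoop, h]

theorem aLoop3 (l : List Char) : aMostrarLoop l 3 = 6 ↔ l = ['t','a','r'] := by
  cases l with
  | nil => simp [aMostrarLoop]
  | cons c cs =>
    by_cases h : c = 't'
    · subst h; simp [aMostrarLoop, aLoop4]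
    · simp [aMostrarLoop, h]

theorem aLoop2 (l : List Char) : aMostrarLoop l 2 = 6 ↔ l = ['s','t','a','r'] := by
  cases l with
  | nil => simp [aMostrarLoop]
  | cons c cs =>
    by_cases h : c = 's'
    · subst h; simp [aMostrarLoop, aLoop3]
    · simp [aMostrarLoop, h]

theorem aLoop1 (l : List Char) : aMostrarLoop l 1 = 6 ↔ l = ['o','s','t','a','r'] := by
  cases l with
  | nil => simp [aMostrarLoop]
  | cons c cs =>
    by_cases h : c = 'o'
    · subst h; simp [aMostrarLoop, aLoop2]
    · simp [aMostrarLoop, h]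

theorem aLoop0 (l : List Char) : aMostrarLoop l 0 = 6 ↔ l = ['m','o','s','t','a','r'] := by
  cases l with
  | nil => simp [aMostrarLoop]
  | cons c cs =>
    by_cases h : c = 'm'
    · subst h; simp [aMostrarLoop, aLoop1]
    · simp [aMostrarLoop, h]

-- A accepts exactly the string "mostar".
theorem a_mostrar_eq (word : String) : a_mostrar word = (word == "mostar") := by
  have h := aLoop0 word.toList
  simp only [a_mostrar]
  by_cases hw : word = "mostar"
  · subst hw; decide
  · have : word.toList ≠ ['m','o','s','t','a','r'] := by
      intro hl
      exact hw (by
        have : word.toList = "mostar".toList := by simpa using hl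
        exact String.toList_injective this)
    simp [h.not.mpr this, hw]

-- ===== VERDICT (by name: the statement is the Claim_ definition above) =====
theorem a_mostrar_spec : Claim_unchanged_a_mostrar := by
  intro word _ hD
  have hA := a_mostrar_eq word
  have h1 : word ≠ "mostar" := fun h => hD (Or.inl h)
  have h2 : word ≠ "mostrar" := fun h => hD (Or.inr h)
  have h3 : word.toList ≠ ['m','o','s','t','r','a','r'] := fun h => h2 (String.toList_injective (by simpa using h))
  simp [hA, a_mostrar_alt, h1, h3]

theorem a_mostrar_changed : Claim_changed_a_mostrar := by unfold Claim_changed_a_mostrar; decide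

theorem a_mostrar_tight : Claim_exact_a_mostrar := by
  intro word _ hD
  rcases hD with h | h <;> subst h <;> decide
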